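-- pv_equiv track=rewrite | github.com/ironsj/MTH225-Assignments | CodingAssignment3.py | injective
-- ===== SOURCE A (Python) =====
-- def injective (f): #creates injective function with dictionary f as argument
--     value = False #creates boolean value and sets to false
--     range_list = [] #creates empty list that will hold range
--     for key in f: #goes through each key in f
--         range_list.append(f[key]) #adds value to range list
--     if len(range_list) == len(set(range_list)): #creates condition that length of range list must be same length as range list with unique elements
--         value = True #true if condition holds true
--     else: #states what happens if condition is not true
--         value = False #sets boolean to false if condition is not true
--     return value #returns boolean value
-- ===== SOURCE B (Python) =====
-- def injective(f):
--     vals = sorted(f.values())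
--     for a, b in zip(vals, vals[1:]):
--         if a == b:
--             return False
--     return True
-- ===== Notes on version B (the rewrite author's own statement) =====
-- stated objective: alternative
-- what changed: A collects all values into a list and compares its length with the length of its set; B instead sorts the values and scans adjacent pairs, returning False at the first equal neighbour - duplicate detection by sorting rather than by hashing/cardinality.
import Mathlib
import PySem

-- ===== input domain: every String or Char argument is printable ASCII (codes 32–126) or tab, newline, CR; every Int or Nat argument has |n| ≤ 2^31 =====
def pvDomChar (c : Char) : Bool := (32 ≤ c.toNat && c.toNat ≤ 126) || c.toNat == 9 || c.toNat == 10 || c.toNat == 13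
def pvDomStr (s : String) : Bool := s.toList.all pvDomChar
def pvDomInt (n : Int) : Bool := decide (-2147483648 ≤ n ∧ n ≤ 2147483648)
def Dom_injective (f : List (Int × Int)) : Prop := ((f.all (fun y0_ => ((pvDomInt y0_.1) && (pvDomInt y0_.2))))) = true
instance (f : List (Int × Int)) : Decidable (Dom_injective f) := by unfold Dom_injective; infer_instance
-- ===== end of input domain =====

-- B replaces A's "collect values, compare list length with set length" by sorting the values
-- and scanning adjacent pairs for an equal neighbour (sort-based duplicate detection; objective: alternative).


-- ===== PORT A =====
def injective (f : List (Int × Int)) : Bool :=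
  let d := PySem.Dict.ofList f
  -- for key in f: range_list.append(f[key]) — f[key] never raises here since every
  -- iterated key is a key of d, so getD with any default is exact
  let rangeList := d.keys.foldl (fun acc key => acc ++ [d.getD key 0]) []
  if rangeList.length = (PySem.Set.ofList rangeList).length then true else false

-- ===== PORT B =====
-- the for-loop over zip(vals, vals[1:]) with its early 'return False'
def adjScan : List (Int × Int) → Bool
  | [] => true
  | (a, b) :: rest => if a = b then false else adjScan rest

def injective_alt (f : List (Int × Int)) : Bool :=
  let vals := PySem.List.sorted (PySem.Dict.ofList f).values (fun x => x) false
  -- vals[1:] on a list is exactly List.drop 1 here (slice with nonnegative start)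
  adjScan (vals.zip (vals.drop 1))

-- ===== PRECONDITION & SPEC =====
def Spec_injective (f : List (Int × Int)) (out : Bool) : Prop := out = injective_alt f
instance (f : List (Int × Int)) (out : Bool) : Decidable (Spec_injective f out) := by unfold Spec_injective; infer_instance

-- ===== CLAIM (what is proved, stated in full; the proofs are below) =====
def Claim_equal_injective : Prop := ∀ (f : List (Int × Int)), Dom_injective f → Spec_injective f (injective f)

-- ===== LEMMAS AND PROOFS =====

-- A's append loop over the keys builds the map of lookups
lemma foldl_append_getD (l : List Int) (d : PySem.Dict Int Int) (acc : List Int) :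
    l.foldl (fun acc key => acc ++ [d.getD key 0]) acc = acc ++ l.map (fun k => d.getD k 0) := by
  induction l generalizing acc with
  | nil => simp
  | cons x xs ih => simp [List.foldl, ih]

lemma foldl_add_len_le (l : List Int) (s : PySem.Set Int) :
    (l.foldl PySem.Set.add s).length ≤ s.length + l.length := by
  induction l generalizing s with
  | nil => simp
  | cons x xs ih =>
      have h := ih (PySem.Set.add s x)
      have : (PySem.Set.add s x).length ≤ s.length + 1 := by
        rw [PySem.Set.add_eq_ite]
        split_ifs <;> simp
      simp only [List.foldl, List.length_cons]
      omega

lemma fresh_iff (x : Int) (xs : List Int) (s : List Int) (hx : x ∉ s) :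
    (xs.Nodup ∧ ∀ v ∈ xs, v ∉ s ++ [x]) ↔ ((x :: xs).Nodup ∧ ∀ v ∈ x :: xs, v ∉ s) := by
  constructor
  · rintro ⟨hnd, h⟩
    refine ⟨List.nodup_cons.mpr ⟨fun hmem => absurd (by simp : x ∈ s ++ [x]) (h x hmem), hnd⟩,
      fun v hv => ?_⟩
    rcases List.mem_cons.mp hv with hv | hv
    · subst hv; exact hx
    · intro hvs; exact (h v hv) (by simp [hvs])
  · rintro ⟨hnd, h⟩
    refine ⟨(List.nodup_cons.mp hnd).2, fun v hv hvs => ?_⟩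
    rcases List.mem_append.mp hvs with hvs | hvs
    · exact (h v (List.mem_cons_of_mem _ hv)) hvs
    · simp only [List.mem_singleton] at hvs; subst hvs
      exact (List.nodup_cons.mp hnd).1 hv

lemma foldl_add_len_eq_iff (l : List Int) (s : PySem.Set Int) :
    (l.foldl PySem.Set.add s).length = s.length + l.length ↔ (l.Nodup ∧ ∀ v ∈ l, v ∉ s) := by
  induction l generalizing s with
  | nil => simp
  | cons x xs ih =>
      simp only [List.foldl, List.length_cons]
      by_cases hx : x ∈ s
      · rw [PySem.Set.add_of_mem hx]
        have hle := foldl_add_len_le xs s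
        constructor
        · intro h; omega
        · rintro ⟨-, h⟩; exact absurd hx (h x (by simp))
      · rw [PySem.Set.add_of_not_mem hx]
        have h1 := ih (s ++ [x])
        have hlen : (s ++ [x]).length + xs.length = s.length + (xs.length + 1) := by
          simp; omega
        rw [hlen] at h1
        rw [h1]
        exact fresh_iff x xs s hx

lemma ofList_len_eq_iff (l : List Int) :
    (l.length = (PySem.Set.ofList l).length) ↔ l.Nodup := by
  rw [PySem.Set.ofList_eq_foldl]
  have := foldl_add_len_eq_iff l PySem.Set.empty
  simp only [PySem.Set.empty] at this
  constructor
  · intro h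
    exact ((this.mp (by simpa using h.symm))).1
  · intro h
    have : (l.foldl PySem.Set.add []).length = [].length + l.length :=
      (foldl_add_len_eq_iff l []).mpr ⟨h, by simp⟩
    simpa using this.symm

-- adjacent scan on a ≤-sorted list decides Nodup
lemma adjScan_sorted_eq (l : List Int) (hs : l.Pairwise (· ≤ ·)) :
    adjScan (l.zip (l.drop 1)) = decide l.Nodup := by
  induction l with
  | nil => simp [adjScan]
  | cons a t ih =>
      cases t with
      | nil => simp [adjScan]
      | cons b t' =>
          have hab : a ≤ b := (List.pairwise_cons.mp hs).1 b (by simp)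
          have hrest : (b :: t').Pairwise (· ≤ ·) := (List.pairwise_cons.mp hs).2
          simp only [List.drop, List.zip_cons_cons, adjScan]
          by_cases hEq : a = b
          · rw [if_pos hEq]
            have : ¬ (a :: b :: t').Nodup := by
              intro h
              exact (List.nodup_cons.mp h).1 (by simp [hEq])
            simp [this]
          · rw [if_neg hEq]
            rw [show (b :: t').zip t' = (b :: t').zip (List.drop 1 (b :: t')) from rfl, ih hrest]
            have hnotmem : a ∉ b :: t' := by
              intro hmem
              rcases List.mem_cons.mp hmem with h | h
              · exact hEq h
              · have hble : ∀ y ∈ t', b ≤ y := (List.pairwise_cons.mp hrest).1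
                have := hble a h
                have : a = b := le_antisymm hab this
                exact hEq this
            simp [List.nodup_cons, hnotmem]

-- ===== VERDICT (by name: the statement is the Claim_ definition above) =====
theorem injective_spec : Claim_equal_injective := by
  intro f _
  simp only [Spec_injective, injective, injective_alt]
  set d := PySem.Dict.ofList f with hd
  have hnd : d.keys.Nodup := PySem.Dict.nodup_keys_ofList f
  rw [foldl_append_getD]
  rw [show d.keys.map (fun k => d.getD k 0) = d.values from
    (PySem.Dict.values_eq_map_keys d hnd 0).symm]
  simp only [List.nil_append]
  set vals := d.values with hvals
  set svals := PySem.List.sorted vals (fun x => x) false with hsv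
  have hperm : svals.Perm vals := PySem.List.sorted_perm vals (fun x => x) false
  have hsorted : svals.Pairwise (· ≤ ·) := by
    have := PySem.List.sorted_pairwise vals (fun x => x)
    simpa using this
  rw [adjScan_sorted_eq svals hsorted]
  by_cases h : vals.length = (PySem.Set.ofList vals).length
  · rw [if_pos h]
    have hnd2 : vals.Nodup := (ofList_len_eq_iff vals).mp h
    simp [hperm.nodup_iff.mpr hnd2]
  · rw [if_neg h]
    have : ¬ vals.Nodup := fun hn => h ((ofList_len_eq_iff vals).mpr hn)
    simp [hperm.nodup_iff, this]
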